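-- pv_equiv track=rewrite | github.com/egeulgen/Bioinformatics_Textbook_Track | solutions/BA9N.py | create_check_point_array
-- ===== SOURCE A (Python) =====
-- def create_check_point_array(BWT, C):
--     symbol_list = list(set(BWT))
--     check_point_array = {}
--     for idx in range(0, len(BWT), C):
--         check_point_array[idx] = {}
--         for symbol in symbol_list:
--             check_point_array[idx][symbol] = BWT[:idx].count(symbol)
--     return check_point_array
-- ===== SOURCE B (Python) =====
-- def create_check_point_array(BWT, C):
--     # One scan per symbol: accumulate counts over the gaps between consecutive
--     # checkpoints instead of recounting the whole prefix at every checkpoint.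
--     check_point_array = {idx: {} for idx in range(0, len(BWT), C)}
--     for symbol in set(BWT):
--         total = 0
--         prev = 0
--         for idx in check_point_array:
--             total += BWT.count(symbol, prev, idx)
--             prev = idx
--             check_point_array[idx][symbol] = total
--     return check_point_array
-- ===== Notes on version B (the rewrite author's own statement) =====
-- stated objective: alternative
-- what changed: Transposes the loops: instead of recounting the whole prefix BWT[:idx] with a fresh slice per symbol at every checkpoint, B scans once per symbol, accumulating bounded-range counts (str.count(symbol, prev, idx)) over the gaps between consecutive checkpoints.
import Mathlib
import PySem

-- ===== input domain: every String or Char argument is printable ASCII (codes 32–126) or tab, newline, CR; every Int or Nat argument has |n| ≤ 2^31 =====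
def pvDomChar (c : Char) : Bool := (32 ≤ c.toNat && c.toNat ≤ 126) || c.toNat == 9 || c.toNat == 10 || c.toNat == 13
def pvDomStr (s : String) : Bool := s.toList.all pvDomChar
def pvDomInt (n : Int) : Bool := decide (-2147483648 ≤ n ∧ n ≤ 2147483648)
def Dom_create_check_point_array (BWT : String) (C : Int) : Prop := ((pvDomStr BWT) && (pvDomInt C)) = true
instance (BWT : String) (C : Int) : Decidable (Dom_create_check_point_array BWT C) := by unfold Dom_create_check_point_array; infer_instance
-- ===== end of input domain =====

-- B transposes A's loops: one scan per symbol accumulating bounded-range counts over the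
-- gaps between consecutive checkpoints, instead of recounting the whole prefix (via a
-- fresh slice per symbol) at every checkpoint.

-- ===== PORT A =====
def create_check_point_array (BWT : String) (C : Int) : List (Int × List (String × Int)) :=
  let symbol_list : List Char := PySem.Set.ofList BWT.toList
  let check_point_array : PySem.Dict Int (PySem.Dict String Int) :=
    (PySem.List.pyRange 0 (PySem.Str.len BWT) C).foldl
      (fun cpa idx =>
        cpa.insert idx
          (symbol_list.foldl
            (fun inner symbol =>
              inner.insert (String.ofList [symbol])
                ((PySem.Str.count (PySem.Str.slice BWT none (some idx)) (String.ofList [symbol]) : Nat) : Int))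
            PySem.Dict.empty))
      PySem.Dict.empty
  check_point_array.items.map (fun p => (p.1, p.2.items))

-- ===== PORT B =====
-- (BWT.count(symbol, prev, idx) is ported as the count of symbol in the slice BWT[prev:idx],
--  which is exact for Python's bounded str.count)
def create_check_point_array_alt (BWT : String) (C : Int) : List (Int × List (String × Int)) :=
  let check_point_array0 : PySem.Dict Int (PySem.Dict String Int) :=
    (PySem.List.pyRange 0 (PySem.Str.len BWT) C).foldl
      (fun d idx => d.insert idx PySem.Dict.empty) PySem.Dict.empty
  let check_point_array :=
    (PySem.Set.ofList BWT.toList : List Char).foldl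
      (fun cpa symbol =>
        (cpa.keys.foldl
          (fun (st : PySem.Dict Int (PySem.Dict String Int) × Int × Int) idx =>
            let total := st.2.1 +
              ((PySem.Chars.count (PySem.List.slice BWT.toList (some st.2.2) (some idx)) [symbol] : Nat) : Int)
            (st.1.insert idx ((st.1.getD idx PySem.Dict.empty).insert (String.ofList [symbol]) total),
             total, idx))
          (cpa, 0, 0)).1)
      check_point_array0
  check_point_array.items.map (fun p => (p.1, p.2.items))


-- ===== PRECONDITION & SPEC =====
-- Pre_ excludes exactly C = 0, on which Python's range(0, len(BWT), 0) raises ValueError in both A and B.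
def Pre_create_check_point_array (BWT : String) (C : Int) : Prop := C ≠ 0
instance (BWT : String) (C : Int) : Decidable (Pre_create_check_point_array BWT C) := by unfold Pre_create_check_point_array; infer_instance
def pvWitness_create_check_point_array : String × Int := ("banana$", 2)

def Spec_create_check_point_array (BWT : String) (C : Int) (out : List (Int × List (String × Int))) : Prop := out = create_check_point_array_alt BWT C
instance (BWT : String) (C : Int) (out : List (Int × List (String × Int))) : Decidable (Spec_create_check_point_array BWT C out) := by unfold Spec_create_check_point_array; infer_instance

-- ===== CLAIM (what is proved, stated in full; the proofs are below) =====
def Claim_equal_create_check_point_array : Prop := ∀ (BWT : String) (C : Int), Dom_create_check_point_array BWT C → Pre_create_check_point_array BWT C → Spec_create_check_point_array BWT C (create_check_point_array BWT C)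

-- ===== LEMMAS AND PROOFS =====

def pvKey (c : Char) : String := String.ofList [c]
def pvSyms (BWT : String) : List Char := PySem.Set.ofList BWT.toList
def pvInner (BWT : String) (l : List Char) : List (String × Int) :=
  (pvSyms BWT).map (fun s => (pvKey s, (l.count s : Int)))
theorem pvKey_injective : Function.Injective pvKey := by
  intro a b h
  have h2 := congrArg String.toList h
  simp only [pvKey, String.toList_ofList] at h2
  exact List.singleton_injective h2

theorem pvSyms_map_nodup (BWT : String) : ((pvSyms BWT).map pvKey).Nodup :=
  (PySem.Set.nodup_ofList BWT.toList).map pvKey_injective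

theorem go_single (c : Char) : ∀ (l : List Char) (fuel acc : Nat), l.length ≤ fuel →
    PySem.Chars.count.go [c] fuel l acc = acc + l.count c := by
  intro l
  induction l with
  | nil => intro fuel acc h; cases fuel <;> simp [PySem.Chars.count.go]
  | cons h t ih =>
    intro fuel acc hf
    cases fuel with
    | zero => simp at hf
    | succ f =>
      have hlen : t.length ≤ f := by simpa using hf
      by_cases hc : c = h
      · subst hc
        rw [PySem.Chars.count.go]
        simp only [List.isPrefixOf, beq_self_eq_true, Bool.true_and,
          if_true, List.length_singleton, List.drop_succ_cons, List.drop_zero]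
        rw [ih f (acc+1) hlen]
        simp
        omega
      · rw [PySem.Chars.count.go]
        have hpre : ([c] : List Char).isPrefixOf (h :: t) = false := by
          simp [List.isPrefixOf]
          exact fun hh => absurd hh hc
        rw [hpre]
        simp only [Bool.false_eq_true, if_false]
        rw [ih f acc hlen]
        simp [Ne.symm hc]

theorem chars_count_singleton (c : Char) (l : List Char) :
    PySem.Chars.count l [c] = l.count c := by
  simp [PySem.Chars.count, go_single c l l.length 0 le_rfl]

theorem pyRange_neg_empty (n C : Int) (hn : 0 ≤ n) (hC : C < 0) :
    PySem.List.pyRange 0 n C = [] := by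
  simp only [PySem.List.pyRange, hC.ne, if_false]
  have h1 : ¬ (0 < C) := by omega
  have h2 : ¬ (n < 0) := by omega
  simp [h1, h2]

theorem pyRange_mem_nonneg (n C x : Int) (hn : 0 ≤ n) (hx : x ∈ PySem.List.pyRange 0 n C) : 0 ≤ x := by
  rcases lt_trichotomy C 0 with h | h | h
  · rw [pyRange_neg_empty n C hn h] at hx; simp at hx
  · subst h; simp [PySem.List.pyRange] at hx
  · rw [PySem.List.pyRange_of_pos 0 n h] at hx
    obtain ⟨k, _, rfl⟩ := List.mem_map.1 hx
    positivity

theorem pyRange_nodup (n C : Int) (hn : 0 ≤ n) : (PySem.List.pyRange 0 n C).Nodup := by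
  rcases lt_trichotomy C 0 with h | h | h
  · rw [pyRange_neg_empty n C hn h]; exact List.nodup_nil
  · subst h; simp [PySem.List.pyRange]
  · rw [PySem.List.pyRange_of_pos 0 n h]
    refine List.Nodup.map ?_ (List.nodup_range)
    intro a b hab
    simp only [zero_add] at hab
    have : (a : Int) = b := by
      have := mul_left_cancel₀ (ne_of_gt h) hab
      exact this
    exact_mod_cast this

theorem inner_items (BWT : String) (idx : Int) (hidx : 0 ≤ idx) :
    ((PySem.Set.ofList BWT.toList : List Char).foldl
      (fun inner symbol =>
        inner.insert (String.ofList [symbol])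
          ((PySem.Str.count (PySem.Str.slice BWT none (some idx)) (String.ofList [symbol]) : Nat) : Int))
      PySem.Dict.empty).items = pvInner BWT (BWT.toList.take idx.toNat) := by
  rw [PySem.Dict.items_foldl_insert_fresh (PySem.Set.ofList BWT.toList)
    (fun symbol => String.ofList [symbol])
    (fun symbol => ((PySem.Str.count (PySem.Str.slice BWT none (some idx)) (String.ofList [symbol]) : Nat) : Int))
    PySem.Dict.empty (by intro a _; exact PySem.Dict.contains_empty _)
    (pvSyms_map_nodup BWT)]
  simp only [PySem.Dict.empty, List.nil_append]
  unfold pvInner pvSyms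
  refine List.map_congr_left (fun s _ => ?_)
  simp only [pvKey]
  congr 1
  rw [PySem.Str.count_eq]
  have h1 : (PySem.Str.slice BWT none (some idx)).toList = BWT.toList.take idx.toNat := by
    rw [PySem.Str.toList_slice, PySem.Chars.slice_eq_listSlice, PySem.List.slice_to _ hidx]
  rw [h1]
  have h2 : (String.ofList [s]).toList = [s] := by simp
  rw [h2, chars_count_singleton]

theorem A_eq (BWT : String) (C : Int) :
    create_check_point_array BWT C =
      (PySem.List.pyRange 0 (PySem.Str.len BWT) C).map
        (fun idx => (idx, pvInner BWT (BWT.toList.take idx.toNat))) := by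
  simp only [create_check_point_array]
  have hn : (0:Int) ≤ PySem.Str.len BWT := by
    simp [PySem.Str.len_eq]
  rw [PySem.Dict.items_foldl_insert_fresh (PySem.List.pyRange 0 (PySem.Str.len BWT) C)
    (fun idx => idx)
    (fun idx => (PySem.Set.ofList BWT.toList : List Char).foldl
      (fun inner symbol =>
        inner.insert (String.ofList [symbol])
          ((PySem.Str.count (PySem.Str.slice BWT none (some idx)) (String.ofList [symbol]) : Nat) : Int))
      PySem.Dict.empty)
    PySem.Dict.empty (by intro a _; exact PySem.Dict.contains_empty _)
    (by simpa using pyRange_nodup _ C hn)]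
  rw [show (PySem.Dict.empty : PySem.Dict Int (PySem.Dict String Int)).items = [] from rfl]
  rw [List.nil_append, List.map_map]
  refine List.map_congr_left (fun idx hidx => ?_)
  simp only [Function.comp]
  rw [inner_items BWT idx (pyRange_mem_nonneg _ C idx hn hidx)]

theorem find?_range_aux (g : Nat → Int) (hg : ∀ a b, g a = g b → a = b)
    (F : Nat → PySem.Dict String Int) :
    ∀ (m a j : Nat), a ≤ j → j < a + m →
    List.find? (fun p => p.1 == g j) ((List.range' a m).map (fun k => (g k, F k)))
      = some (g j, F j) := by
  intro m
  induction m with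
  | zero => intro a j h1 h2; omega
  | succ m ih =>
    intro a j h1 h2
    rw [List.range'_succ, List.map_cons]
    by_cases hja : j = a
    · subst hja
      rw [List.find?_cons_of_pos (by simp)]
    · rw [List.find?_cons_of_neg (by
        intro h; exact hja (hg _ _ (beq_iff_eq.mp h)).symm)]
      exact ih (a+1) j (by omega) (by omega)

theorem getD_mk_range (C : Int) (hC : 0 < C) (M j : Nat) (hj : j < M)
    (F : Nat → PySem.Dict String Int) (d : PySem.Dict String Int) :
    (PySem.Dict.mk ((List.range M).map (fun k : Nat => ((0:Int) + C * (k:Int), F k)))).getD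
      ((0:Int) + C * (j:Int)) d = F j := by
  have hg : ∀ a b : Nat, (0:Int) + C * (a:Int) = (0:Int) + C * (b:Int) → a = b := by
    intro a b h
    have h2 : C * (a:Int) = C * b := by linarith
    have h3 : (a:Int) = b := mul_left_cancel₀ hC.ne' h2
    exact_mod_cast h3
  rw [PySem.Dict.getD, PySem.Dict.get?, List.range_eq_range']
  rw [find?_range_aux _ hg F M 0 j (Nat.zero_le _) (by omega)]
  rfl

theorem contains_mk_range (C : Int) (M j : Nat) (hj : j < M)
    (F : Nat → PySem.Dict String Int) :
    (PySem.Dict.mk ((List.range M).map (fun k : Nat => ((0:Int) + C * (k:Int), F k)))).contains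
      ((0:Int) + C * (j:Int)) = true := by
  rw [PySem.Dict.contains_mk, List.any_eq_true]
  exact ⟨((0:Int) + C * (j:Int), F j), List.mem_map.2 ⟨j, List.mem_range.2 hj, rfl⟩, by simp⟩

theorem count_take_telescope (s : Char) (l : List Char) (p q : Nat) (hpq : p ≤ q) :
    (l.take p).count s + (List.take (q - p) (l.drop p)).count s = (l.take q).count s := by
  rw [show q = p + (q - p) from by omega, List.take_add, List.count_append]
  simp

-- one pass of B's symbol loop over the checkpoint keys (C > 0)
theorem pass_invariant (BWT : String) (C : Int) (hC : 0 < C) (s : Char) (M : Nat)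
    (innerIt : Nat → List (String × Int))
    (hfresh : ∀ k, (String.ofList [s]) ∉ (innerIt k).map Prod.fst) :
    ∀ (j : Nat), j ≤ M →
    ((List.range j).map (fun k : Nat => (0:Int) + C * (k:Int))).foldl
      (fun (st : PySem.Dict Int (PySem.Dict String Int) × Int × Int) idx =>
        (st.1.insert idx ((st.1.getD idx PySem.Dict.empty).insert (String.ofList [s])
           (st.2.1 + ((PySem.Chars.count (PySem.List.slice BWT.toList (some st.2.2) (some idx)) [s] : Nat) : Int))),
         st.2.1 + ((PySem.Chars.count (PySem.List.slice BWT.toList (some st.2.2) (some idx)) [s] : Nat) : Int),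
         idx))
      (PySem.Dict.mk ((List.range M).map (fun k : Nat => ((0:Int) + C * (k:Int), PySem.Dict.mk (innerIt k)))), 0, 0)
    = (PySem.Dict.mk ((List.range M).map (fun k : Nat => ((0:Int) + C * (k:Int),
         PySem.Dict.mk (innerIt k ++ (if k < j then
           [(String.ofList [s], ((BWT.toList.take (C.toNat * k)).count s : Int))] else []))))),
       ((BWT.toList.take (C.toNat * (j - 1))).count s : Int),
       ((C.toNat * (j - 1) : Nat) : Int)) := by
  have hCC : ((C.toNat : Nat) : Int) = C := Int.toNat_of_nonneg hC.le
  intro j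
  induction j with
  | zero => simp
  | succ j ih =>
    intro hj
    have hjM : j < M := by omega
    rw [List.range_succ, List.map_append, List.foldl_append, ih (by omega)]
    simp only [List.map_cons, List.map_nil, List.foldl_cons, List.foldl_nil]
    have harg1 : ((C.toNat * (j - 1) : Nat) : Int) = (0:Int) + C * ((j - 1 : Nat) : Int) := by
      push_cast [hCC]; ring
    have hargj : (0:Int) + C * (j:Int) = ((C.toNat * j : Nat) : Int) := by push_cast [hCC]; ring
    have hslice : (PySem.List.slice BWT.toList (some ((C.toNat * (j - 1) : Nat) : Int))
        (some ((0:Int) + C * (j:Int)))) = List.take (C.toNat * j - C.toNat * (j - 1))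
          (List.drop (C.toNat * (j - 1)) BWT.toList) := by
      rw [hargj, PySem.List.slice_natCast]
    have hle : C.toNat * (j - 1) ≤ C.toNat * j := Nat.mul_le_mul_left _ (by omega)
    have htot : ((BWT.toList.take (C.toNat * (j - 1))).count s : Int) +
        ((PySem.Chars.count (PySem.List.slice BWT.toList (some ((C.toNat * (j - 1) : Nat) : Int))
          (some ((0:Int) + C * (j:Int)))) [s] : Nat) : Int)
        = ((BWT.toList.take (C.toNat * j)).count s : Int) := by
      rw [hslice, chars_count_singleton]
      rw [← count_take_telescope s BWT.toList (C.toNat * (j - 1)) (C.toNat * j) hle]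
      push_cast; ring
    refine Prod.ext ?_ (Prod.ext ?_ ?_)
    · show (PySem.Dict.mk ((List.range M).map (fun k : Nat => ((0:Int) + C * (k:Int),
          PySem.Dict.mk (innerIt k ++ (if k < j then
            [(String.ofList [s], ((BWT.toList.take (C.toNat * k)).count s : Int))] else [])))))).insert
          ((0:Int) + C * (j:Int))
          (((PySem.Dict.mk ((List.range M).map (fun k : Nat => ((0:Int) + C * (k:Int),
            PySem.Dict.mk (innerIt k ++ (if k < j then
              [(String.ofList [s], ((BWT.toList.take (C.toNat * k)).count s : Int))] else [])))))).getD
            ((0:Int) + C * (j:Int)) PySem.Dict.empty).insert (String.ofList [s])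
            (((BWT.toList.take (C.toNat * (j - 1))).count s : Int) +
             ((PySem.Chars.count (PySem.List.slice BWT.toList (some ((C.toNat * (j - 1) : Nat) : Int))
               (some ((0:Int) + C * (j:Int)))) [s] : Nat) : Int)))
        = PySem.Dict.mk ((List.range M).map (fun k : Nat => ((0:Int) + C * (k:Int),
            PySem.Dict.mk (innerIt k ++ (if k < j + 1 then
              [(String.ofList [s], ((BWT.toList.take (C.toNat * k)).count s : Int))] else [])))))
      rw [getD_mk_range C hC M j hjM]
      rw [if_neg (by omega)]
      rw [List.append_nil, htot]
      have hinner : (PySem.Dict.mk (innerIt j)).insert (String.ofList [s])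
          ((BWT.toList.take (C.toNat * j)).count s : Int)
          = PySem.Dict.mk (innerIt j ++
              [(String.ofList [s], ((BWT.toList.take (C.toNat * j)).count s : Int))]) := by
        apply PySem.Dict.ext
        rw [PySem.Dict.items_insert_of_not_contains]
        rw [PySem.Dict.contains_mk, List.any_eq_false]
        intro p hp h
        exact hfresh j ((beq_iff_eq.mp h) ▸ List.mem_map_of_mem hp)
      rw [hinner]
      apply PySem.Dict.ext
      rw [PySem.Dict.items_insert_of_contains _ _
        (contains_mk_range C M j hjM _)]
      show List.map _ (List.map _ (List.range M)) = _
      rw [List.map_map]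
      refine List.map_congr_left (fun k hk => ?_)
      simp only [Function.comp]
      by_cases hkj : k = j
      · subst hkj
        rw [if_pos (by simp)]
        rw [if_pos (by omega)]
      · have hne : (((0:Int) + C * (k:Int)) == (0:Int) + C * (j:Int)) = false := by
          rw [beq_eq_false_iff_ne]
          intro h
          have h2 : C * (k:Int) = C * j := by linarith
          have h3 : (k:Int) = j := mul_left_cancel₀ hC.ne' h2
          exact hkj (by exact_mod_cast h3)
        rw [if_neg (by simp; exact ⟨hkj, by omega⟩)]
        by_cases hklt : k < j
        · rw [if_pos hklt, if_pos (by omega)]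
        · rw [if_neg hklt, if_neg (by omega)]
    · show _ = ((BWT.toList.take (C.toNat * (j + 1 - 1))).count s : Int)
      rw [getD_mk_range C hC M j hjM] -- not needed for snd? keep simple
      simp only [Nat.add_sub_cancel]
      exact htot
    · show (0:Int) + C * (j:Int) = ((C.toNat * (j + 1 - 1) : Nat) : Int)
      simp only [Nat.add_sub_cancel]
      push_cast [hCC]; ring

theorem outer_loop (BWT : String) (C : Int) (hC : 0 < C) (M : Nat) :
    ∀ (S : List Char) (innerIt : Nat → List (String × Int)),
    (∀ s ∈ S, ∀ k, (String.ofList [s]) ∉ (innerIt k).map Prod.fst) →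
    (S.map (fun s => String.ofList [s])).Nodup →
    S.foldl
      (fun cpa symbol =>
        (cpa.keys.foldl
          (fun (st : PySem.Dict Int (PySem.Dict String Int) × Int × Int) idx =>
            (st.1.insert idx ((st.1.getD idx PySem.Dict.empty).insert (String.ofList [symbol])
               (st.2.1 + ((PySem.Chars.count (PySem.List.slice BWT.toList (some st.2.2) (some idx)) [symbol] : Nat) : Int))),
             st.2.1 + ((PySem.Chars.count (PySem.List.slice BWT.toList (some st.2.2) (some idx)) [symbol] : Nat) : Int),
             idx))
          (cpa, 0, 0)).1)
      (PySem.Dict.mk ((List.range M).map (fun k : Nat => ((0:Int) + C * (k:Int), PySem.Dict.mk (innerIt k)))))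
    = PySem.Dict.mk ((List.range M).map (fun k : Nat => ((0:Int) + C * (k:Int),
        PySem.Dict.mk (innerIt k ++ S.map (fun s =>
          (String.ofList [s], ((BWT.toList.take (C.toNat * k)).count s : Int))))))) := by
  intro S
  induction S with
  | nil => intro innerIt _ _; simp
  | cons s S' ih =>
    intro innerIt hfresh hnodup
    rw [List.foldl_cons]
    have hkeys : (PySem.Dict.mk ((List.range M).map
        (fun k : Nat => ((0:Int) + C * (k:Int), PySem.Dict.mk (innerIt k))))).keys
        = (List.range M).map (fun k : Nat => (0:Int) + C * (k:Int)) := by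
      simp [PySem.Dict.keys]
    rw [hkeys]
    rw [pass_invariant BWT C hC s M innerIt (fun k => hfresh s (List.mem_cons_self) k) M le_rfl]
    have hmap : ((List.range M).map (fun k : Nat => ((0:Int) + C * (k:Int),
        PySem.Dict.mk (innerIt k ++ (if k < M then
          [(String.ofList [s], ((BWT.toList.take (C.toNat * k)).count s : Int))] else [])))))
        = (List.range M).map (fun k : Nat => ((0:Int) + C * (k:Int),
            PySem.Dict.mk ((fun k => innerIt k ++
              [(String.ofList [s], ((BWT.toList.take (C.toNat * k)).count s : Int))]) k))) := by
      refine List.map_congr_left (fun k hk => ?_)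
      rw [if_pos (List.mem_range.1 hk)]
    rw [hmap]
    rw [ih (fun k => innerIt k ++
        [(String.ofList [s], ((BWT.toList.take (C.toNat * k)).count s : Int))])
      (by
        intro s' hs' k
        rw [List.map_append, List.mem_append]
        rintro (h | h)
        · exact hfresh s' (List.mem_cons_of_mem _ hs') k h
        · simp only [List.map_cons, List.map_nil, List.mem_singleton] at h
          have hne : String.ofList [s'] ≠ String.ofList [s] := by
            intro he
            have : String.ofList [s] ∈ S'.map (fun t => String.ofList [t]) :=
              he ▸ List.mem_map_of_mem hs'
            rw [List.map_cons] at hnodup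
            exact (List.nodup_cons.1 hnodup).1 this
          exact hne h)
      (by rw [List.map_cons] at hnodup; exact (List.nodup_cons.1 hnodup).2)]
    refine congrArg _ (List.map_congr_left (fun k _ => ?_))
    simp [List.append_assoc]

theorem B_eq (BWT : String) (C : Int) (hC : C ≠ 0) :
    create_check_point_array_alt BWT C =
      (PySem.List.pyRange 0 (PySem.Str.len BWT) C).map
        (fun idx => (idx, pvInner BWT (BWT.toList.take idx.toNat))) := by
  have hn : (0:Int) ≤ PySem.Str.len BWT := by simp [PySem.Str.len_eq]
  simp only [create_check_point_array_alt]
  rcases lt_or_gt_of_ne hC with h | h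
  · rw [pyRange_neg_empty _ C hn h]
    have hconst : ∀ (S : List Char),
        S.foldl
          (fun cpa symbol =>
            (cpa.keys.foldl
              (fun (st : PySem.Dict Int (PySem.Dict String Int) × Int × Int) idx =>
                (st.1.insert idx ((st.1.getD idx PySem.Dict.empty).insert (String.ofList [symbol])
                   (st.2.1 + ((PySem.Chars.count (PySem.List.slice BWT.toList (some st.2.2) (some idx)) [symbol] : Nat) : Int))),
                 st.2.1 + ((PySem.Chars.count (PySem.List.slice BWT.toList (some st.2.2) (some idx)) [symbol] : Nat) : Int),
                 idx))
              (cpa, 0, 0)).1)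
          PySem.Dict.empty = PySem.Dict.empty := by
      intro S
      induction S with
      | nil => rfl
      | cons t S' ih => rw [List.foldl_cons]; exact ih
    rw [List.foldl_nil, hconst]
    rfl
  · have hCC : ((C.toNat : Nat) : Int) = C := Int.toNat_of_nonneg (le_of_lt h)
    rw [PySem.List.pyRange_of_pos 0 _ h]
    have hcpa0 : ((List.range (if 0 < PySem.Str.len BWT then
          ((PySem.Str.len BWT - 0 + C - 1) / C).toNat else 0)).map
          (fun k : Nat => (0:Int) + C * (k:Int))).foldl
          (fun (d : PySem.Dict Int (PySem.Dict String Int)) idx => d.insert idx PySem.Dict.empty)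
          PySem.Dict.empty
        = PySem.Dict.mk ((List.range (if 0 < PySem.Str.len BWT then
            ((PySem.Str.len BWT - 0 + C - 1) / C).toNat else 0)).map
            (fun k : Nat => ((0:Int) + C * (k:Int), PySem.Dict.mk ((fun _ : Nat => ([] : List (String × Int))) k)))) := by
      apply PySem.Dict.ext
      rw [PySem.Dict.items_foldl_insert_fresh _ (fun idx => idx) (fun _ => PySem.Dict.empty)
        PySem.Dict.empty (by intro a _; exact PySem.Dict.contains_empty _)
        (by
          simp only [List.map_map]
          refine List.Nodup.map ?_ List.nodup_range
          intro a b hab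
          simp only [Function.comp] at hab
          have h2 : C * (a:Int) = C * b := by linarith [hab]
          have h3 : (a:Int) = b := mul_left_cancel₀ h.ne' h2
          exact_mod_cast h3)]
      rw [show (PySem.Dict.empty : PySem.Dict Int (PySem.Dict String Int)).items = [] from rfl]
      rw [List.nil_append, List.map_map]
      rfl
    rw [hcpa0]
    rw [outer_loop BWT C h _ (PySem.Set.ofList BWT.toList) (fun _ => [])
      (by intro s _ k hmem; simp at hmem) (pvSyms_map_nodup BWT)]
    simp only [List.map_map]
    refine List.map_congr_left (fun k hk => ?_)
    simp only [Function.comp]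
    have htn : ((0:Int) + C * (k:Int)).toNat = C.toNat * k := by
      rw [show (0:Int) + C * (k:Int) = ((C.toNat * k : Nat) : Int) by push_cast [hCC]; ring]
      exact Int.toNat_natCast _
    rw [htn]
    unfold pvInner pvSyms pvKey
    simp

-- ===== VERDICT (by name: the statement is the Claim_ definition above) =====
theorem create_check_point_array_spec : Claim_equal_create_check_point_array := by
  intro BWT C _ hC
  unfold Spec_create_check_point_array
  rw [A_eq, B_eq BWT C hC]
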